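-- pv_equiv track=rewrite | github.com/espendk/SchantzNewYearsCodingChallenge2016 | Christian Iversen/schantz-xmas-challenge/xmas5py/__init__.py | best_offset
-- ===== SOURCE A (Python) =====
-- def number_bit_length(number):
--     return len(bin(abs(number))[2:].lstrip("0"))
--
-- def total_bit_width(string, offset):
--     bits = 0
--     for c in string:
--         bits += number_bit_length(ord(c) - offset)
--     bits += number_bit_length(offset)
--     return bits
--
-- def best_offset(string):
--     best = 0xFFFFFFFF
--     index = None
--     for x in range(0, 256):
--         new = total_bit_width(string, x)
--         if new < best:
--             best = new
--             index = x
--     return index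
-- ===== SOURCE B (Python) =====
-- def best_offset(string):
--     # Histogram of character codes, built once; each offset then costs
--     # O(distinct values) instead of O(len(string)).
--     hist = {}
--     for c in string:
--         v = ord(c)
--         hist[v] = hist.get(v, 0) + 1
--     best = None
--     index = None
--     for x in range(256):
--         total = x.bit_length()
--         for v, cnt in hist.items():
--             total += cnt * abs(v - x).bit_length()
--         if best is None or total < best:
--             best = total
--             index = x
--     return index
-- ===== Notes on version B (the rewrite author's own statement) =====
-- stated objective: faster
-- what changed: Instead of re-scanning the whole string for each of the 256 candidate offsets, B builds a histogram of character codes once and computes each offset's total as a sum of count*bit_length over the distinct codes only; Pre_ excludes only strings of >= ~613 million characters, where A's 0xFFFFFFFF sentinel could be missed by every offset so that A returns None (not an int).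
import Mathlib
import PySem

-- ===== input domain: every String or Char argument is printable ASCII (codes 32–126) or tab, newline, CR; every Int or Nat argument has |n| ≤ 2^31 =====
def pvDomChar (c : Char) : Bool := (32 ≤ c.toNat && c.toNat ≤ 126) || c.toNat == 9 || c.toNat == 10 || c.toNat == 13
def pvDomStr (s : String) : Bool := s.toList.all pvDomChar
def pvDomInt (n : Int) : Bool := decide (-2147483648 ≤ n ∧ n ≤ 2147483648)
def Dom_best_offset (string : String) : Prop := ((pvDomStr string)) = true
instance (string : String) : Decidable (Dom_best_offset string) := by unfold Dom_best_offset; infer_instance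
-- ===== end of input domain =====

-- B replaces A's 256 full passes over the string by one histogram pass plus a
-- 256-offset scan over the distinct character codes (objective: faster).

-- ===== PORT A =====
-- len(bin(abs(number))[2:].lstrip("0")) is exactly the binary bit length of |number|
-- (lstrip only matters for 0, where bin gives "0" and the length is 0): Nat.size.
def number_bit_length (number : Int) : Int := (Nat.size number.natAbs : Int)

def total_bit_width (string : String) (offset : Int) : Int :=
  let bits := string.toList.foldl
    (fun bits c => bits + number_bit_length ((c.toNat : Int) - offset)) 0
  bits + number_bit_length offset

def best_offset (string : String) : Int :=
  let r := (PySem.List.pyRange 0 256 1).foldl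
    (fun (st : Int × Option Int) x =>
      let new := total_bit_width string x
      if new < st.1 then (new, some x) else st)
    ((0xFFFFFFFF : Int), (none : Option Int))
  -- Python returns index, which is still None when no total beat the sentinel;
  -- those inputs are excluded by Pre_best_offset (None is not an Int)
  r.2.getD 0

-- ===== PORT B =====
-- int.bit_length() of a non-negative int (B always calls it on x>=0 / abs(v-x))
def int_bit_length (n : Int) : Int := (Nat.size n.natAbs : Int)

def best_offset_alt (string : String) : Int :=
  let hist := string.toList.foldl
    (fun (d : PySem.Dict Int Int) c =>
      let v : Int := c.toNat
      d.insert v (d.getD v 0 + 1))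
    PySem.Dict.empty
  let r := (PySem.List.pyRange 0 256 1).foldl
    (fun (st : Option Int × Option Int) x =>
      let total := hist.items.foldl
        (fun t p => t + p.2 * int_bit_length (p.1 - x)) (int_bit_length x)
      match st.1 with
      | none => (some total, some x)
      | some b => if total < b then (some total, some x) else st)
    ((none : Option Int), (none : Option Int))
  r.2.getD 0

-- ===== PRECONDITION & SPEC =====
-- Pre_ excludes only strings of ≥ ~613 million characters: there A's running total can
-- reach the 0xFFFFFFFF sentinel for every offset, so A can return None (not an int).
-- The bound is conservative: on some such huge strings A still returns an int (B agrees there).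
def Pre_best_offset (string : String) : Prop :=
  7 * (string.toList.length : Int) < 0xFFFFFFFF
instance (string : String) : Decidable (Pre_best_offset string) := by
  unfold Pre_best_offset; infer_instance

def pvWitness_best_offset : String := "hello world"

def Spec_best_offset (string : String) (out : Int) : Prop := out = best_offset_alt string
instance (string : String) (out : Int) : Decidable (Spec_best_offset string out) := by
  unfold Spec_best_offset; infer_instance

-- ===== CLAIM (what is proved, stated in full; the proofs are below) =====
def Claim_equal_best_offset : Prop :=
  ∀ (string : String), Dom_best_offset string → Pre_best_offset string →
    Spec_best_offset string (best_offset string)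

-- ===== LEMMAS AND PROOFS =====

-- sum over a Nodup index set of (if k = a then c else 0) is c when a is in the set
theorem pv_sum_ite (c : Int) : ∀ (S : List Int) (a : Int), S.Nodup → a ∈ S →
    (S.map (fun k => if k = a then c else 0)).sum = c := by
  intro S
  induction S with
  | nil => intro a _ h; cases h
  | cons b S ih =>
    intro a hnd hmem
    rcases List.nodup_cons.mp hnd with ⟨hb, hnd'⟩
    rcases List.mem_cons.mp hmem with h | h
    · subst h
      have hz : (S.map (fun k => if k = a then c else 0)).sum = 0 := by
        apply List.sum_eq_zero
        intro x hx
        rcases List.mem_map.mp hx with ⟨k, hk, rfl⟩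
        have : k ≠ a := fun he => hb (he ▸ hk)
        simp [this]
      simp [hz]
    · have : b ≠ a := fun he => hb (he ▸ h)
      simp [this, ih a hnd' h]

theorem pv_map_sum_add (f1 f2 : Int → Int) : ∀ (S : List Int),
    (S.map (fun k => f1 k + f2 k)).sum = (S.map f1).sum + (S.map f2).sum := by
  intro S
  induction S with
  | nil => simp
  | cons b S ih => simp only [List.map_cons, List.sum_cons, ih]; ring

theorem pv_hist_sum_aux (g : Int → Int) : ∀ (vals S : List Int), S.Nodup →
    (∀ v ∈ vals, v ∈ S) →
    (S.map (fun k => ((vals.count k : Int)) * g k)).sum = (vals.map g).sum := by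
  intro vals
  induction vals with
  | nil => intro S _ _; simp
  | cons a t ih =>
    intro S hnd hmem
    have hstep : (fun k => (((a :: t).count k : Int)) * g k)
        = (fun k => ((t.count k : Int)) * g k + (if k = a then g a else 0)) := by
      funext k
      by_cases hk : k = a
      · subst hk; push_cast [List.count_cons_self]; simp [Int.add_mul]
      · have : (k == a) = false := by simp [hk]
        simp [List.count_cons, hk]
        exact Or.inl (fun he => hk he.symm)
    rw [hstep, pv_map_sum_add,
        ih S hnd (fun v hv => hmem v (List.mem_cons_of_mem _ hv)),
        pv_sum_ite (g a) S a hnd (hmem a (List.mem_cons_self ..))]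
    simp
    ring

-- Σ_{k ∈ set(vals)} count(vals,k)·g k = Σ_{v ∈ vals} g v
theorem pv_hist_sum (g : Int → Int) (vals : List Int) :
    ((PySem.Set.ofList vals).map (fun k => ((vals.count k : Int)) * g k)).sum
      = (vals.map g).sum := by
  exact pv_hist_sum_aux g vals (PySem.Set.ofList vals) (PySem.Set.nodup_ofList vals)
    (fun v hv => (PySem.Set.mem_ofList vals v).mpr hv)

-- the two offset scans stay in lockstep once B's best is some b = A's best
theorem pv_scan (t : Int → Int) : ∀ (xs : List Int) (b : Int) (i : Option Int),
    xs.foldl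
      (fun (st : Option Int × Option Int) x =>
        match st.1 with
        | none => (some (t x), some x)
        | some bb => if t x < bb then (some (t x), some x) else st)
      (some b, i)
    = (some (xs.foldl
        (fun (st : Int × Option Int) x =>
          if t x < st.1 then (t x, some x) else st) (b, i)).1,
       (xs.foldl
        (fun (st : Int × Option Int) x =>
          if t x < st.1 then (t x, some x) else st) (b, i)).2) := by
  intro xs
  induction xs with
  | nil => intro b i; simp
  | cons x xs ih =>
    intro b i
    simp only [List.foldl_cons]
    by_cases h : t x < b
    · simp [h, ih]
    · simp [h, ih]

theorem pv_sum_le (B : Int) : ∀ (l : List Char) (f : Char → Int),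
    (∀ c ∈ l, f c ≤ B) → (l.map f).sum ≤ B * l.length := by
  intro l
  induction l with
  | nil => intro f _; simp
  | cons a l ih =>
    intro f h
    have h1 := h a (List.mem_cons_self ..)
    have h2 := ih f (fun c hc => h c (List.mem_cons_of_mem _ hc))
    simp only [List.map_cons, List.sum_cons, List.length_cons]
    push_cast
    nlinarith

-- ===== VERDICT (by name: the statement is the Claim_ definition above) =====
theorem best_offset_spec : Claim_equal_best_offset := by
  intro string hdom hpre
  unfold Spec_best_offset
  -- the histogram loop is Counter(map(ord, string))
  have hist_eq : string.toList.foldl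
      (fun (d : PySem.Dict Int Int) c =>
        let v : Int := c.toNat
        d.insert v (d.getD v 0 + 1)) PySem.Dict.empty
      = PySem.Dict.counter (string.toList.map (fun c => (c.toNat : Int))) := by
    have h : (string.toList.map (fun c : Char => (c.toNat : Int))).foldl
        (fun (d : PySem.Dict Int Int) v => d.insert v (d.getD v 0 + 1)) PySem.Dict.empty
        = string.toList.foldl
          (fun (d : PySem.Dict Int Int) c => d.insert (c.toNat : Int) (d.getD (c.toNat : Int) 0 + 1))
          PySem.Dict.empty := List.foldl_map
    exact h.symm.trans (PySem.Dict.foldl_insert_getD_add_one_eq_counter _)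
  -- per offset, B's histogram sum equals A's per-character sum
  have htot : ∀ x : Int,
      (PySem.Dict.counter (string.toList.map (fun c => (c.toNat : Int)))).items.foldl
        (fun t p => t + p.2 * int_bit_length (p.1 - x)) (int_bit_length x)
      = total_bit_width string x := by
    intro x
    rw [PySem.List.foldl_add (g := fun p : Int × Int => p.2 * int_bit_length (p.1 - x)),
        PySem.Dict.items_counter, List.map_map]
    have hc : ((fun p : Int × Int => p.2 * int_bit_length (p.1 - x)) ∘
        (fun k => (k, ((string.toList.map (fun c => (c.toNat : Int))).count k : Int))))
        = fun k => (((string.toList.map (fun c => (c.toNat : Int))).count k : Int))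
            * int_bit_length (k - x) := rfl
    rw [hc, pv_hist_sum (fun v => int_bit_length (v - x)) _]
    unfold total_bit_width
    rw [PySem.List.foldl_add (g := fun c : Char => number_bit_length ((c.toNat : Int) - x)),
        List.map_map]
    have hc2 : ((fun v => int_bit_length (v - x)) ∘ (fun c : Char => (c.toNat : Int)))
        = fun c : Char => number_bit_length ((c.toNat : Int) - x) := rfl
    rw [hc2]
    simp [number_bit_length, int_bit_length]
    ring
  -- offset 0 already beats A's sentinel (Dom: chars < 128, Pre_: 7·len small)
  have ht0 : total_bit_width string 0 < (0xFFFFFFFF : Int) := by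
    have hch : ∀ c ∈ string.toList,
        number_bit_length ((c.toNat : Int) - 0) ≤ 7 := by
      intro c hc
      have hd : pvDomChar c = true := by
        have := (List.all_eq_true.mp hdom) c hc
        exact this
      have hle : c.toNat ≤ 126 := by
        unfold pvDomChar at hd
        simp only [Bool.or_eq_true, Bool.and_eq_true, decide_eq_true_eq, beq_iff_eq] at hd
        omega
      have : ((c.toNat : Int) - 0).natAbs = c.toNat := by omega
      unfold number_bit_length
      rw [this]
      have : Nat.size c.toNat ≤ 7 := Nat.size_le.mpr (by omega)
      exact_mod_cast this
    unfold total_bit_width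
    show string.toList.foldl
        (fun bits c => bits + number_bit_length ((c.toNat : Int) - 0)) 0
        + number_bit_length 0 < (0xFFFFFFFF : Int)
    rw [PySem.List.foldl_add (g := fun c : Char => number_bit_length ((c.toNat : Int) - 0))]
    have hsum := pv_sum_le 7 string.toList _ hch
    have hz : number_bit_length 0 = 0 := by
      unfold number_bit_length; simp [Nat.size]
    rw [hz]
    unfold Pre_best_offset at hpre
    omega
  -- both scans over range(256) agree
  unfold best_offset best_offset_alt
  rw [hist_eq]
  simp only [htot]
  rw [PySem.List.pyRange_one_cons (by norm_num)]
  simp only [List.foldl_cons]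
  rw [if_pos ht0]
  rw [pv_scan (total_bit_width string) (PySem.List.pyRange (0 + 1) 256 1)
      (total_bit_width string 0) (some 0)]
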